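-- pv_equiv track=rewrite | github.com/Guan93/leetcode | 544.output-contest-matches.py | findContestMatch
-- ===== SOURCE A (Python) =====
-- def findContestMatch(n: int) -> str:
--     def helper(l):
--         if len(l) == 1:
--             return l[0]
--         new_list = []
--         for i in range(len(l) // 2):
--             new_list.append(f'({l[i]},{l[-(i + 1)]})')
--         return helper(new_list)
--
--     return helper([str(i + 1) for i in range(n)])
-- ===== SOURCE B (Python) =====
-- def findContestMatch(n: int) -> str:
--     # Top-down recursion on positions: no intermediate lists are built.
--     # lengths[k] = length of the team list entering round k; elem(t, i) is
--     # the string at position i after t rounds (round t-1 pairs i with m-1-i).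
--     lengths = []
--     m = n
--     while m > 1:
--         lengths.append(m)
--         m //= 2
--     def elem(t, i):
--         if t == 0:
--             return str(i + 1)
--         m = lengths[t - 1]
--         return f'({elem(t - 1, i)},{elem(t - 1, m - 1 - i)})'
--     return elem(len(lengths), 0)
-- ===== Notes on version B (the rewrite author's own statement) =====
-- stated objective: alternative
-- what changed: Replaces A's bottom-up recursion over shrinking lists by a top-down recursion on positions: B records the round lengths once, then computes the answer directly via elem(t,i)=(elem(t-1,i),elem(t-1,m-1-i)), building no intermediate lists (which also skips pair strings that odd rounds would drop).
-- outside the precondition, e.g. on findContestMatch(0): A raises RecursionError, B returns '1'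
import Mathlib
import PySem

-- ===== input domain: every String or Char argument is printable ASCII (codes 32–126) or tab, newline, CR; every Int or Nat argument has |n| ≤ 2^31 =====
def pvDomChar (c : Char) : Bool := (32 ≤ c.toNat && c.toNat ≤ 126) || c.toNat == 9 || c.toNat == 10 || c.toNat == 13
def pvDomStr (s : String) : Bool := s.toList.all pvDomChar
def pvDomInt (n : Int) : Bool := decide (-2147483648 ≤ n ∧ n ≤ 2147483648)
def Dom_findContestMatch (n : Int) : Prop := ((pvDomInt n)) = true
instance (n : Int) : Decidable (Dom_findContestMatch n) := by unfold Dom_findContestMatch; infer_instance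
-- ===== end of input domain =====

-- B replaces A's bottom-up list-shrinking recursion by a top-down recursion on positions
-- (round lengths recorded first, then the answer computed directly) — objective: alternative.

-- ===== PORT A =====
-- helper(l): recursion; on l = [] Python recurses forever (RecursionError), excluded by
-- Pre_; the 'l.length = 0 → ""' branch is only a totality guard for that divergent case.
-- len(l)//2 with len(l) ≥ 0 is exactly Nat division l.length / 2.
def fcmHelperA (l : List String) : String :=
  if l.length = 1 then (PySem.List.pyGet? l 0).getD ""
  else if l.length = 0 then ""  -- divergence guard (Python never returns here)
  else
    fcmHelperA
      ((PySem.List.pyRange 0 (↑(l.length / 2)) 1).foldl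
        (fun acc i =>
          acc ++ ["(" ++ (PySem.List.pyGet? l i).getD "" ++ "," ++
                  (PySem.List.pyGet? l (-(i + 1))).getD "" ++ ")"]) [])
termination_by l.length
decreasing_by
  rw [PySem.List.foldl_append_singleton_eq_map]
  simp [PySem.List.length_pyRange_one]
  omega

def findContestMatch (n : Int) : String :=
  fcmHelperA ((PySem.List.pyRange 0 n 1).map (fun i => PySem.Int.toStr (i + 1)))

-- ===== PORT B =====
-- the 'while m > 1: lengths.append(m); m //= 2' loop, returning the lengths list
def fcmLens (m : Int) : List Int :=
  if 1 < m then m :: fcmLens (PySem.Int.floordiv m 2) else []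
termination_by m.toNat
decreasing_by
  rw [PySem.Int.floordiv_eq_ediv_of_pos (by omega)]
  omega

-- elem(t, i); lengths[t-1] is always in range as elem is called (getD 0 is a totality default)
def fcmElem (lens : List Int) : Nat → Int → String
  | 0, i => PySem.Int.toStr (i + 1)
  | t + 1, i =>
    let m := (PySem.List.pyGet? lens (↑t)).getD 0
    "(" ++ fcmElem lens t i ++ "," ++ fcmElem lens t (m - 1 - i) ++ ")"

def findContestMatch_alt (n : Int) : String :=
  fcmElem (fcmLens n) (fcmLens n).length 0

-- ===== PRECONDITION & SPEC =====
-- Pre_ excludes n ≤ 0: there A's helper recurses forever on [] (RecursionError).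
def Pre_findContestMatch (n : Int) : Prop := 1 ≤ n
instance (n : Int) : Decidable (Pre_findContestMatch n) := by unfold Pre_findContestMatch; infer_instance
def pvWitness_findContestMatch : Int := 4

def Spec_findContestMatch (n : Int) (out : String) : Prop := out = findContestMatch_alt n
instance (n : Int) (out : String) : Decidable (Spec_findContestMatch n out) := by unfold Spec_findContestMatch; infer_instance

-- ===== CLAIM (what is proved, stated in full; the proofs are below) =====
def Claim_equal_findContestMatch : Prop := ∀ (n : Int), Dom_findContestMatch n → Pre_findContestMatch n → Spec_findContestMatch n (findContestMatch n)

-- ===== LEMMAS AND PROOFS =====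
-- one round of A's loop, written as a map (proof-side helper)
def fcmPairs (l : List String) : List String :=
  (PySem.List.pyRange 0 (↑(l.length / 2)) 1).map
    (fun i => "(" ++ (PySem.List.pyGet? l i).getD "" ++ "," ++
              (PySem.List.pyGet? l (-(i + 1))).getD "" ++ ")")

-- t rounds of A's loop
def fcmIter : Nat → List String → List String
  | 0, l => l
  | t + 1, l => fcmIter t (fcmPairs l)

-- the initial list [str(i+1) for i in range(N)]
def fcmInit (N : Nat) : List String :=
  (PySem.List.pyRange 0 (↑N) 1).map (fun j => PySem.Int.toStr (j + 1))

lemma fcm_pairs_eq (l : List String) :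
    ((PySem.List.pyRange 0 (↑(l.length / 2)) 1).foldl
      (fun acc i =>
        acc ++ ["(" ++ (PySem.List.pyGet? l i).getD "" ++ "," ++
                (PySem.List.pyGet? l (-(i + 1))).getD "" ++ ")"]) []) = fcmPairs l := by
  rw [PySem.List.foldl_append_singleton_eq_map]
  simp [fcmPairs]

lemma length_fcmPairs (l : List String) : (fcmPairs l).length = l.length / 2 := by
  simp [fcmPairs, PySem.List.length_pyRange_one]
  omega

lemma fcmIter_succ_right (t : Nat) : ∀ l : List String,
    fcmIter (t + 1) l = fcmPairs (fcmIter t l) := by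
  induction t with
  | zero => intro l; rfl
  | succ t ih => intro l; exact ih (fcmPairs l)

lemma fcmLens_len_eq (l : List String) :
    fcmLens ↑l.length = if 1 < l.length then ↑l.length :: fcmLens ↑(l.length / 2) else [] := by
  rw [fcmLens.eq_def]
  have h2 : PySem.Int.floordiv (↑l.length) 2 = ↑(l.length / 2) := by
    exact_mod_cast PySem.Int.floordiv_natCast l.length 2
  rcases Nat.lt_or_ge 1 l.length with h | h
  · simp [h]
  · have h' : ¬ (1 : Int) < ↑l.length := by exact_mod_cast Nat.not_lt.mpr h
    simp [h', Nat.not_lt.mp (by omega : ¬ 1 < l.length)]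

-- A's recursion equals iterating its round T times, T = the number of rounds
lemma fcm_A_iter (l : List String) (h : 1 ≤ l.length) :
    fcmHelperA l = (PySem.List.pyGet? (fcmIter (fcmLens ↑l.length).length l) 0).getD "" := by
  by_cases h1 : l.length = 1
  · rw [fcmHelperA.eq_def, fcmLens_len_eq]
    simp [h1, fcmIter]
  · have h2 : 2 ≤ l.length := by omega
    rw [fcmHelperA.eq_def, fcmLens_len_eq]
    simp only [h1, if_false, if_neg (by omega : ¬ l.length = 0),
      if_pos (by omega : 1 < l.length), List.length_cons]
    rw [fcm_pairs_eq]
    have hp : 1 ≤ (fcmPairs l).length := by rw [length_fcmPairs]; omega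
    have := fcm_A_iter (fcmPairs l) hp
    rw [length_fcmPairs] at this
    simpa [fcmIter] using this
termination_by l.length
decreasing_by
  rw [length_fcmPairs]
  omega

-- after all rounds exactly one string is left
lemma fcm_iter_final (l : List String) (h : 1 ≤ l.length) :
    (fcmIter (fcmLens ↑l.length).length l).length = 1 := by
  by_cases h1 : l.length = 1
  · rw [fcmLens_len_eq]; simp [h1, fcmIter]
  · have h2 : 2 ≤ l.length := by omega
    rw [fcmLens_len_eq]
    simp only [if_pos (by omega : 1 < l.length), List.length_cons]
    have hp : 1 ≤ (fcmPairs l).length := by rw [length_fcmPairs]; omega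
    have := fcm_iter_final (fcmPairs l) hp
    rw [length_fcmPairs] at this
    simpa [fcmIter] using this
termination_by l.length
decreasing_by
  rw [length_fcmPairs]
  omega

-- lens[t] = the length of the round-t list
lemma fcm_lens_get (t : Nat) : ∀ (l : List String),
    t < (fcmLens ↑l.length).length →
    (PySem.List.pyGet? (fcmLens ↑l.length) ↑t).getD 0 = ↑(fcmIter t l).length := by
  induction t with
  | zero =>
    intro l ht
    rw [fcmLens_len_eq] at ht ⊢
    by_cases h : 1 < l.length
    · simp [h, fcmIter]
    · simp [h] at ht
  | succ t ih =>
    intro l ht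
    rw [fcmLens_len_eq] at ht ⊢
    by_cases h : 1 < l.length
    · simp only [h, if_true, List.length_cons] at ht ⊢
      have hrw : ((l.length / 2 : Nat) : Int) = ↑(fcmPairs l).length := by
        rw [length_fcmPairs]
      rw [hrw]
      have hlt : t < (fcmLens ↑(fcmPairs l).length).length := by
        rw [← hrw]
        omega
      have hih := ih (fcmPairs l) hlt
      have hget : PySem.List.pyGet? ((↑l.length : Int) :: fcmLens ↑(fcmPairs l).length) ((↑(t + 1) : Nat) : Int)
          = PySem.List.pyGet? (fcmLens ↑(fcmPairs l).length) ((↑t : Nat) : Int) := by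
        rw [PySem.List.pyGet?_natCast, PySem.List.pyGet?_natCast]
        rfl
      rw [hget, hih]
      rfl
    · simp [h] at ht

lemma fcmInit_length (N : Nat) : (fcmInit N).length = N := by
  simp [fcmInit, PySem.List.length_pyRange_one]

-- B's elem(t, i) is entry i of the round-t list
lemma fcm_elem_iter (N : Nat) (t : Nat) (ht : t ≤ (fcmLens ↑N).length) :
    ∀ i : Int, 0 ≤ i → i < ↑(fcmIter t (fcmInit N)).length →
      fcmElem (fcmLens ↑N) t i
        = (PySem.List.pyGet? (fcmIter t (fcmInit N)) i).getD "" := by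
  induction t with
  | zero =>
    intro i h0 hi
    simp only [fcmIter] at hi ⊢
    rw [fcmInit_length] at hi
    have hget : PySem.List.pyGet? (fcmInit N) i = some (PySem.Int.toStr (i + 1)) := by
      rw [PySem.List.pyGet?_of_nonneg _ h0, fcmInit,
        PySem.List.getElem?_map_pyRange_zero _ N i.toNat (by omega)]
      congr 2
      omega
    rw [hget]
    rfl
  | succ t ih =>
    intro i h0 hi
    have htl : t < (fcmLens ↑N).length := by omega
    have hm : (PySem.List.pyGet? (fcmLens ↑N) ↑t).getD 0 = ↑(fcmIter t (fcmInit N)).length := by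
      have := fcm_lens_get t (fcmInit N) (by rw [fcmInit_length]; exact htl)
      rwa [fcmInit_length] at this
    rw [fcmIter_succ_right] at hi ⊢
    rw [length_fcmPairs] at hi
    have hi2 : i.toNat < (fcmIter t (fcmInit N)).length / 2 := by omega
    have hL1 : 1 ≤ (fcmIter t (fcmInit N)).length := by omega
    -- right-hand side: unfold one layer of fcmPairs at index i
    have hget : PySem.List.pyGet? (fcmPairs (fcmIter t (fcmInit N))) i
        = some ("(" ++ (PySem.List.pyGet? (fcmIter t (fcmInit N)) ↑i.toNat).getD "" ++ "," ++
                (PySem.List.pyGet? (fcmIter t (fcmInit N)) (-(↑i.toNat + 1))).getD "" ++ ")") := by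
      rw [PySem.List.pyGet?_of_nonneg _ h0, fcmPairs,
        PySem.List.getElem?_map_pyRange_zero _ ((fcmIter t (fcmInit N)).length / 2) i.toNat hi2]
    rw [hget]
    have hneg : PySem.List.pyGet? (fcmIter t (fcmInit N)) (-(↑i.toNat + 1))
        = PySem.List.pyGet? (fcmIter t (fcmInit N))
            ((↑((fcmIter t (fcmInit N)).length - (i.toNat + 1)) : Nat) : Int) := by
      rw [show (-(↑i.toNat + 1) : Int) = -((↑(i.toNat + 1) : Nat) : Int) by push_cast; ring]
      rw [PySem.List.pyGet?_neg_natCast _ (i.toNat + 1) (by omega) (by omega),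
        PySem.List.pyGet?_natCast]
    rw [hneg]
    -- left-hand side: one layer of fcmElem
    show (fun m => "(" ++ fcmElem (fcmLens ↑N) t i ++ "," ++ fcmElem (fcmLens ↑N) t (m - 1 - i) ++ ")")
        ((PySem.List.pyGet? (fcmLens ↑N) ↑t).getD 0) = _
    rw [hm]
    simp only []
    rw [ih (by omega) i h0 (by exact_mod_cast (by omega : i < ((fcmIter t (fcmInit N)).length : Int))),
      ih (by omega) ((↑(fcmIter t (fcmInit N)).length : Int) - 1 - i) (by omega) (by omega)]
    rw [show ((i.toNat : Nat) : Int) = i from by omega,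
      show ((((fcmIter t (fcmInit N)).length - (i.toNat + 1) : Nat)) : Int)
          = (↑(fcmIter t (fcmInit N)).length : Int) - 1 - i from by omega]
    rfl

-- ===== VERDICT (by name: the statement is the Claim_ definition above) =====
theorem findContestMatch_spec : Claim_equal_findContestMatch := by
  intro n _ hpre
  unfold Pre_findContestMatch at hpre
  unfold Spec_findContestMatch findContestMatch findContestMatch_alt
  have hN : n = ((n.toNat : Nat) : Int) := by omega
  rw [hN]
  have hinit : (PySem.List.pyRange 0 ((n.toNat : Nat) : Int) 1).map (fun i => PySem.Int.toStr (i + 1)) = fcmInit n.toNat := rfl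
  rw [hinit]
  have hlen : 1 ≤ (fcmInit n.toNat).length := by rw [fcmInit_length]; omega
  rw [fcm_A_iter _ hlen, fcmInit_length]
  have hone : (fcmIter (fcmLens ↑n.toNat).length (fcmInit n.toNat)).length = 1 := by
    have := fcm_iter_final (fcmInit n.toNat) hlen
    rwa [fcmInit_length] at this
  rw [fcm_elem_iter n.toNat (fcmLens ↑n.toNat).length (le_refl _) 0 (by omega) (by rw [hone]; omega)]
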